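-- pv_equiv track=rewrite | github.com/ScottLangridge/AdventOfCode | 2015/Day-11/day11-2.py | increment_pwd
-- ===== SOURCE A (Python) =====
-- def increment_pwd(pwd):
--     pwd = list(pwd)
--     i = -1
--
--     # Handle z
--     while pwd[i] == 'z':
--         pwd[i] = 'a'
--         i -= 1
--
--     # Skip "ambiguous" letters
--     pwd[i] = increment_char(pwd[i])
--     while pwd[i] in 'iol':
--         pwd[i] = increment_char(pwd[i])
--
--     return ''.join(pwd)
--
-- def increment_char(char):
--     return chr(97 + (((ord(char) - 97) + 1) % 26))
-- ===== SOURCE B (Python) =====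
-- def increment_char(char):
--     return chr(97 + (((ord(char) - 97) + 1) % 26))
--
--
-- def increment_pwd(pwd):
--     if pwd[-1] == 'z':
--         return increment_pwd(pwd[:-1]) + 'a'
--     c = increment_char(pwd[-1])
--     while c in 'iol':
--         c = increment_char(c)
--     return pwd[:-1] + c
-- ===== Notes on version B (the rewrite author's own statement) =====
-- stated objective: simpler
-- what changed: Replaces A's in-place mutation of a char list driven by a negative index walked leftward with a plain structural recursion over the string suffix (carry = recurse on pwd[:-1] and append 'a'), building the result by string concatenation instead of list assignment.
import Mathlib
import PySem

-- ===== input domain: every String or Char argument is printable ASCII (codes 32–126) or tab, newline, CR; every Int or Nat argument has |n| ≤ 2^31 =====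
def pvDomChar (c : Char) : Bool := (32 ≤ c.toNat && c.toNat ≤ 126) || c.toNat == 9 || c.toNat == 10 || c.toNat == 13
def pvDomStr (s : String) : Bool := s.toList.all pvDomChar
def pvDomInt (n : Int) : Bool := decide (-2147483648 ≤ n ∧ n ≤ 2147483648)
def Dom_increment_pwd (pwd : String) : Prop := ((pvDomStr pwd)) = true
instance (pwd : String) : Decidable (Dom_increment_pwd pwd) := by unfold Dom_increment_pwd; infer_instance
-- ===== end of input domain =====

-- B replaces A's negative-index in-place list mutation by structural recursion on the string
-- suffix (objective: simpler); equal return values on Pre_ (some character is not 'z').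


-- ===== PORT A =====
-- chr(97 + (((ord(char) - 97) + 1) % 26)) — Python % is PySem.Int.mod
def increment_char (c : Char) : Char :=
  Char.ofNat (97 + (PySem.Int.mod (((c.toNat : Int) - 97) + 1) 26)).toNat

-- while pwd[i] == 'z': pwd[i] = 'a'; i -= 1
-- fuel len+1 suffices; Bool=false marks the IndexError Python raises there (outside Pre_)
def aZLoop : Nat → List Char → Int → (List Char × Int × Bool)
  | 0, xs, i => (xs, i, false)
  | f+1, xs, i =>
    match PySem.List.pyGet? xs i with
    | none => (xs, i, false)
    | some c =>
      if c = 'z' then aZLoop f (PySem.List.pySetD xs i 'a') (i - 1) else (xs, i, true)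

-- while pwd[i] in 'iol': pwd[i] = increment_char(pwd[i])   (runs at most 2 times; fuel 3 suffices)
def aSkipLoop : Nat → List Char → Int → List Char
  | 0, xs, _ => xs
  | f+1, xs, i =>
    match PySem.List.pyGet? xs i with
    | none => xs
    | some c =>
      if c = 'i' ∨ c = 'o' ∨ c = 'l' then
        aSkipLoop f (PySem.List.pySetD xs i (increment_char c)) i
      else xs

def increment_pwd (pwd : String) : String :=
  match aZLoop (pwd.toList.length + 1) pwd.toList (-1) with
  | (xs, i, ok) =>
    if ok then
      match PySem.List.pyGet? xs i with
      | none => ""          -- unreachable when ok = true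
      | some c => String.mk (aSkipLoop 3 (PySem.List.pySetD xs i (increment_char c)) i)
    else ""                 -- Python raises IndexError here; excluded by Pre_

-- ===== PORT B =====
-- c = increment_char(pwd[-1]); while c in 'iol': c = increment_char(c)   (fuel 3 as above)
def skipChar : Nat → Char → Char
  | 0, c => c
  | f+1, c => if c = 'i' ∨ c = 'o' ∨ c = 'l' then skipChar f (increment_char c) else c

-- Source B's recursion on pwd[:-1], ported over the reversed char list (head = last char)
def incRev : List Char → List Char
  | [] => []                -- ''[-1] raises IndexError in Python; excluded by Pre_
  | c :: rest =>
    if c = 'z' then 'a' :: incRev rest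
    else skipChar 3 (increment_char c) :: rest

def increment_pwd_alt (pwd : String) : String :=
  String.mk (incRev pwd.toList.reverse).reverse

-- ===== PRECONDITION & SPEC =====
-- Pre_ excludes exactly the inputs on which Python's A raises IndexError: the empty string
-- and strings consisting only of 'z'.
def Pre_increment_pwd (pwd : String) : Prop := pwd.toList.any (· ≠ 'z') = true
instance (pwd : String) : Decidable (Pre_increment_pwd pwd) := by
  unfold Pre_increment_pwd; infer_instance
def pvWitness_increment_pwd : String := "abc"

def Spec_increment_pwd (pwd : String) (out : String) : Prop := out = increment_pwd_alt pwd
instance (pwd : String) (out : String) : Decidable (Spec_increment_pwd pwd out) := by unfold Spec_increment_pwd; infer_instance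

-- ===== CLAIM (what is proved, stated in full; the proofs are below) =====
def Claim_equal_increment_pwd : Prop := ∀ (pwd : String), Dom_increment_pwd pwd → Pre_increment_pwd pwd → Spec_increment_pwd pwd (increment_pwd pwd)

-- ===== LEMMAS AND PROOFS =====

-- reading (u ++ x :: v)[-(len v + 1)] yields x
theorem pyGet?_mid (u v : List Char) (x : Char) :
    PySem.List.pyGet? (u ++ x :: v) (-((v.length : Int) + 1)) = some x := by
  have h := PySem.List.pyGet?_neg_natCast (xs := u ++ x :: v) (k := v.length + 1)
    (by omega) (by simp)
  have he : -((v.length : Int) + 1) = -((v.length + 1 : Nat) : Int) := by push_cast; ring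
  rw [he, h]
  simp

-- writing y at index -(len v + 1) of u ++ x :: v replaces x
theorem pySetD_mid (u v : List Char) (x y : Char) :
    PySem.List.pySetD (u ++ x :: v) (-((v.length : Int) + 1)) y = u ++ y :: v := by
  simp [PySem.List.pySetD, PySem.List.pySet?, PySem.List.pyIdx?]
  split
  · omega
  · rw [if_pos (by omega)]
    simp [List.set_append_right]

-- A's skip loop at a fixed in-range index is B's skip loop on the char there
theorem aSkip_run (f : Nat) : ∀ (u v : List Char) (d : Char),
    aSkipLoop f (u ++ d :: v) (-((v.length : Int) + 1)) = u ++ skipChar f d :: v := by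
  induction f with
  | zero => intro u v d; simp [aSkipLoop, skipChar]
  | succ n ih =>
    intro u v d
    simp only [aSkipLoop, pyGet?_mid, skipChar]
    by_cases h : d = 'i' ∨ d = 'o' ∨ d = 'l'
    · rw [if_pos h, if_pos h, pySetD_mid, ih]
    · rw [if_neg h, if_neg h]

-- A's z-loop turns the trailing block of k 'z's into 'a's and stops at the first non-'z'
theorem aZ_run (k : Nat) : ∀ (acc : List Char) (f : Nat) (front : List Char) (c : Char),
    c ≠ 'z' → k + 1 ≤ f →
    aZLoop f (front ++ c :: (List.replicate k 'z' ++ acc)) (-((acc.length : Int) + 1))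
      = (front ++ c :: (List.replicate k 'a' ++ acc), -(((k + acc.length : Nat) : Int) + 1), true) := by
  induction k with
  | zero =>
    intro acc f front c hc hf
    obtain ⟨f', rfl⟩ : ∃ f', f = f' + 1 := ⟨f - 1, by omega⟩
    simp only [List.replicate, List.nil_append, aZLoop, pyGet?_mid]
    rw [if_neg hc]
    simp
  | succ n ih =>
    intro acc f front c hc hf
    obtain ⟨f', rfl⟩ : ∃ f', f = f' + 1 := ⟨f - 1, by omega⟩
    have h1 : front ++ c :: (List.replicate (n+1) 'z' ++ acc)
        = (front ++ c :: List.replicate n 'z') ++ 'z' :: acc := by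
      rw [List.replicate_succ']; simp
    rw [h1, aZLoop, pyGet?_mid]
    simp only [reduceIte]
    rw [pySetD_mid]
    have h3 : (front ++ c :: List.replicate n 'z') ++ 'a' :: acc
        = front ++ c :: (List.replicate n 'z' ++ ('a' :: acc)) := by simp
    have h4 : -((acc.length : Int) + 1) - 1 = -(((('a' :: acc) : List Char).length : Int) + 1) := by
      simp; ring
    have e1 : List.replicate n 'a' ++ ('a' :: acc) = List.replicate (n+1) 'a' ++ acc := by
      rw [List.replicate_succ']; simp
    rw [h3, h4, ih ('a' :: acc) f' front c hc (by omega), e1]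
    simp only [Prod.mk.injEq, List.length_cons]
    refine ⟨trivial, ?_, trivial⟩
    push_cast
    ring

-- B's recursion on the reversed list over the same decomposition
theorem incRev_run (k : Nat) (c : Char) (w : List Char) (hc : c ≠ 'z') :
    incRev (List.replicate k 'z' ++ c :: w)
      = List.replicate k 'a' ++ skipChar 3 (increment_char c) :: w := by
  induction k with
  | zero => simp [incRev, hc]
  | succ n ih => simp [List.replicate_succ, incRev, ih]

-- any list with a non-'z' element splits as front ++ c :: 'z'*k with c ≠ 'z'
theorem split_last_nonz (l : List Char) (h : ∃ c ∈ l, c ≠ 'z') :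
    ∃ front c k, l = front ++ c :: List.replicate k 'z' ∧ c ≠ 'z' := by
  induction l using List.reverseRecOn with
  | nil => simp at h
  | append_singleton init last ih =>
    by_cases hl : last = 'z'
    · subst hl
      obtain ⟨c, hc, hcz⟩ := h
      have : ∃ c ∈ init, c ≠ 'z' := by
        rcases List.mem_append.1 hc with h' | h'
        · exact ⟨c, h', hcz⟩
        · simp at h'; subst h'; exact absurd rfl hcz
      obtain ⟨front, c, k, heq, hcz'⟩ := ih this
      exact ⟨front, c, k + 1, by
        rw [heq]; simp [List.replicate_succ' (n := k)], hcz'⟩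
    · exact ⟨init, last, 0, by simp, hl⟩

-- ===== VERDICT (by name: the statement is the Claim_ definition above) =====
theorem increment_pwd_spec : Claim_equal_increment_pwd := by
  intro pwd _ hpre
  unfold Spec_increment_pwd
  unfold Pre_increment_pwd at hpre
  simp only [List.any_eq_true, decide_eq_true_eq] at hpre
  obtain ⟨front, c, k, heq, hc⟩ := split_last_nonz pwd.toList hpre
  unfold increment_pwd increment_pwd_alt
  rw [heq]
  -- A side: run the z-loop
  have hz := aZ_run k [] ((front ++ c :: List.replicate k 'z').length + 1) front c hc
    (by simp; omega)
  simp only [List.append_nil, List.length_nil, Nat.add_zero, Nat.cast_zero, neg_add_rev] at hz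
  rw [show ((-1 : Int) + -0) = -1 by ring,
     show ((-1 : Int) + -(k : Int)) = -((k : Int) + 1) by ring] at hz
  rw [hz]
  simp only [reduceIte]
  have hg := pyGet?_mid front (List.replicate k 'a') c
  simp only [List.length_replicate] at hg
  rw [hg]
  show String.mk (aSkipLoop 3 (PySem.List.pySetD (front ++ c :: List.replicate k 'a')
      (-((k : Int) + 1)) (increment_char c)) (-((k : Int) + 1)))
    = String.mk (incRev (front ++ c :: List.replicate k 'z').reverse).reverse
  have hs := pySetD_mid front (List.replicate k 'a') c (increment_char c)
  simp only [List.length_replicate] at hs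
  rw [hs]
  have hk := aSkip_run 3 front (List.replicate k 'a') (increment_char c)
  simp only [List.length_replicate] at hk
  rw [hk]
  -- B side
  have hrev : (front ++ c :: List.replicate k 'z').reverse
      = List.replicate k 'z' ++ c :: front.reverse := by
    simp [List.reverse_append]
  rw [hrev, incRev_run k c front.reverse hc]
  simp [List.reverse_append]
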